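-- pv_equiv track=rewrite | github.com/drewtenn/DrunixOS | docs/generate_diagrams.py | orthogonalize_points
-- ===== SOURCE A (Python) =====
-- def simplify_orthogonal_points(points):
--     if not points:
--         return []
--     simplified = [points[0]]
--     for point in points[1:]:
--         if point != simplified[-1]:
--             simplified.append(point)
--     changed = True
--     while changed and len(simplified) >= 3:
--         changed = False
--         out = [simplified[0]]
--         for i in range(1, len(simplified) - 1):
--             a = out[-1]
--             b = simplified[i]
--             c = simplified[i + 1]
--             if (a[0] == b[0] == c[0]) or (a[1] == b[1] == c[1]):
--                 changed = True
--                 continue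
--             out.append(b)
--         out.append(simplified[-1])
--         simplified = out
--     return simplified
--
-- def orthogonalize_points(points, first_axis='x'):
--     if not points:
--         return []
--     orth = [points[0]]
--     axis = first_axis
--     for target in points[1:]:
--         cur = orth[-1]
--         if cur == target:
--             continue
--         if cur[0] != target[0] and cur[1] != target[1]:
--             corner = (target[0], cur[1]) if axis == 'x' else (cur[0], target[1])
--             orth.append(corner)
--             axis = 'y' if axis == 'x' else 'x'
--         orth.append(target)
--         if orth[-2][0] == orth[-1][0]:
--             axis = 'x'
--         elif orth[-2][1] == orth[-1][1]:
--             axis = 'y'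
--     orth = simplify_orthogonal_points(orth)
--     for a, b in zip(orth, orth[1:]):
--         if a[0] != b[0] and a[1] != b[1]:
--             raise ValueError('non-orthogonal state-machine segment')
--     return orth
-- ===== SOURCE B (Python) =====
-- def _dedup(points):
--     out = [points[0]]
--     for p in points[1:]:
--         if p != out[-1]:
--             out.append(p)
--     return out
--
-- def _collinear(a, b, c):
--     return (a[0] == b[0] == c[0]) or (a[1] == b[1] == c[1])
--
-- def simplify_orthogonal_points(points):
--     if not points:
--         return []
--     out = []
--     for p in _dedup(points):
--         out.append(p)
--         while len(out) >= 3 and _collinear(out[-3], out[-2], out[-1]):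
--             del out[-2]
--     return out
--
-- def orthogonalize_points(points, first_axis='x'):
--     if not points:
--         return []
--     orth = [points[0]]
--     axis = first_axis
--     for target in points[1:]:
--         cur = orth[-1]
--         if cur == target:
--             continue
--         if cur[0] != target[0] and cur[1] != target[1]:
--             corner = (target[0], cur[1]) if axis == 'x' else (cur[0], target[1])
--             orth.append(corner)
--             axis = 'y' if axis == 'x' else 'x'
--         orth.append(target)
--         if orth[-2][0] == orth[-1][0]:
--             axis = 'x'
--         elif orth[-2][1] == orth[-1][1]:
--             axis = 'y'
--     orth = simplify_orthogonal_points(orth)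
--     for a, b in zip(orth, orth[1:]):
--         if a[0] != b[0] and a[1] != b[1]:
--             raise ValueError('non-orthogonal state-machine segment')
--     return orth
-- ===== Notes on version B (the rewrite author's own statement) =====
-- stated objective: idiomatic
-- what changed: simplify_orthogonal_points's repeated rebuild-until-fixpoint while-loop is replaced by a single-pass stack reduction that pops the middle of an axis-collinear last-three after each push; the corner-insertion loop and the final validation are unchanged.
import Mathlib
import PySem

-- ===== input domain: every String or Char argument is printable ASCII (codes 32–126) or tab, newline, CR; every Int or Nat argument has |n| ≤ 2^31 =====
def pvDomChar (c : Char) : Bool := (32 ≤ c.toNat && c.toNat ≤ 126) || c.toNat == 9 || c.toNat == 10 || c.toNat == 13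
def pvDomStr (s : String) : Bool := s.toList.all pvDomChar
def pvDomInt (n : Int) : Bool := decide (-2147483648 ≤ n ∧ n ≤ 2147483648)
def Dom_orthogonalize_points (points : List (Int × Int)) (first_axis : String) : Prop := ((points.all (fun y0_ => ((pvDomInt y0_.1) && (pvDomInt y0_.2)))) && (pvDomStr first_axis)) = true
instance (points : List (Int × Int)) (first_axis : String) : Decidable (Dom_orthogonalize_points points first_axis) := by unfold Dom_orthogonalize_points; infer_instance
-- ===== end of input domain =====

-- B replaces the fixpoint rebuild loop of simplify_orthogonal_points by a single-pass stack
-- reduction (idiomatic/alternative rewrite); the corner-insertion loop, the dedup prelude and the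
-- final validation are the same code in both Pythons and are shared helpers here.

-- `(a[0] == b[0] == c[0]) or (a[1] == b[1] == c[1])` — used by both Pythons
def pvCollin (a b c : Int × Int) : Bool :=
  (a.1 == b.1 && b.1 == c.1) || (a.2 == b.2 && b.2 == c.2)

-- shared dedup prelude: `out = [points[0]]; for p in points[1:]: if p != out[-1]: out.append(p)`
def pvDedupGo (last : Int × Int) : List (Int × Int) → List (Int × Int)
  | [] => []
  | p :: t => if p == last then pvDedupGo last t else p :: pvDedupGo p t

-- the main corner-insertion loop (identical in Source A and Source B); accumulator is `orth` reversed
def pvBuildGo (axis : String) (orthRev rest : List (Int × Int)) : List (Int × Int) :=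
  match rest with
  | [] => orthRev.reverse
  | target :: ts =>
    let cur := orthRev.headD (0, 0)    -- orthRev is always nonempty
    if cur == target then pvBuildGo axis orthRev ts
    else
      let both := cur.1 != target.1 && cur.2 != target.2
      let orth1 := if both then
          (if axis == "x" then (target.1, cur.2) else (cur.1, target.2)) :: orthRev
        else orthRev
      let axis1 := if both then (if axis == "x" then "y" else "x") else axis
      let prev := orth1.headD (0, 0)   -- orth[-2] after appending target
      let axis2 := if prev.1 == target.1 then "x"
                   else if prev.2 == target.2 then "y" else axis1
      pvBuildGo axis2 (target :: orth1) ts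

-- final check `for a, b in zip(orth, orth[1:])` (identical in both Pythons); Python raises
-- ValueError on a non-orthogonal pair — that branch is ported as [] (it is shared by both ports,
-- so the equivalence claim is unaffected by the value chosen for it)
def pvOrthOk : List (Int × Int) → Bool
  | a :: b :: t => (a.1 == b.1 || a.2 == b.2) && pvOrthOk (b :: t)
  | _ => true

def pvValidate (l : List (Int × Int)) : List (Int × Int) :=
  if pvOrthOk l then l else []

-- ===== PORT A =====
-- one pass of A's inner `for i in range(1, len(simplified) - 1)` loop; `a` is out[-1],
-- accRev is out reversed; returns (out, changed)
def pvPassGo (a : Int × Int) (accRev rest : List (Int × Int)) (ch : Bool) :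
    List (Int × Int) × Bool :=
  match rest with
  | b :: c :: t =>
    if pvCollin a b c then pvPassGo a accRev (c :: t) true
    else pvPassGo b (b :: accRev) (c :: t) ch
  | [lastp] => ((lastp :: accRev).reverse, ch)
  | [] => (accRev.reverse, ch)

-- the next two lemmas are cited by pvLoopA's decreasing_by (a changed pass shrinks the list)
theorem pvPassGo_len_le : ∀ (rest : List (Int × Int)) a accRev ch,
    (pvPassGo a accRev rest ch).1.length ≤ accRev.length + rest.length := by
  intro rest a accRev ch
  fun_induction pvPassGo a accRev rest ch with
  | case1 a accRev ch b c t hcol ih => simp at ih ⊢; omega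
  | case2 a accRev ch b c t hcol ih => simp at ih ⊢; omega
  | case3 => simp
  | case4 => simp

theorem pvPassGo_lt : ∀ (rest : List (Int × Int)) a accRev,
    (pvPassGo a accRev rest false).2 = true →
    (pvPassGo a accRev rest false).1.length < accRev.length + rest.length := by
  intro rest
  induction rest with
  | nil => intro a accRev h; simp [pvPassGo] at h
  | cons b rest ih =>
    intro a accRev h
    match rest with
    | [] => simp [pvPassGo] at h
    | c :: t =>
      rw [pvPassGo.eq_def] at h ⊢
      simp only at h ⊢
      by_cases hcol : pvCollin a b c
      · simp only [hcol, if_true] at h ⊢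
        have := pvPassGo_len_le (c :: t) a accRev true
        simp at this ⊢; omega
      · rw [if_neg hcol] at h ⊢
        have := ih b (b :: accRev) h
        simp at this ⊢; omega

-- A's `while changed and len(simplified) >= 3:` fixpoint loop
def pvLoopA : List (Int × Int) → List (Int × Int)
  | [] => []
  | a :: rest =>
    if 3 ≤ (a :: rest).length then
      if h : (pvPassGo a [a] rest false).2 = true then
        pvLoopA (pvPassGo a [a] rest false).1
      else (pvPassGo a [a] rest false).1
    else a :: rest
termination_by l => l.length
decreasing_by
  have := pvPassGo_lt rest a [a] h
  simp at this ⊢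
  omega

-- simplify_orthogonal_points of Source A
def pvSimplifyA (l : List (Int × Int)) : List (Int × Int) :=
  match l with
  | [] => []
  | p :: rest => pvLoopA (p :: pvDedupGo p rest)

def orthogonalize_points (points : List (Int × Int)) (first_axis : String) : List (Int × Int) :=
  match points with
  | [] => []
  | p :: rest => pvValidate (pvSimplifyA (pvBuildGo first_axis [p] rest))

-- ===== PORT B =====
-- `while len(out) >= 3 and _collinear(out[-3], out[-2], out[-1]): del out[-2]` — the stack `out`
-- is kept reversed (head = top), reversed back at the end of the pass
def pvPopWhile (p : Int × Int) (s : List (Int × Int)) : List (Int × Int) :=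
  match s with
  | q :: r :: t => if pvCollin r q p then pvPopWhile p (r :: t) else p :: q :: r :: t
  | _ => p :: s

def pvPush (s : List (Int × Int)) (p : Int × Int) : List (Int × Int) := pvPopWhile p s

-- simplify_orthogonal_points of Source B: dedup, then one left-to-right stack pass
def pvSimplifyB (l : List (Int × Int)) : List (Int × Int) :=
  match l with
  | [] => []
  | p :: rest => ((p :: pvDedupGo p rest).foldl pvPush []).reverse

def orthogonalize_points_alt (points : List (Int × Int)) (first_axis : String) : List (Int × Int) :=
  match points with
  | [] => []
  | p :: rest => pvValidate (pvSimplifyB (pvBuildGo first_axis [p] rest))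

-- ===== PRECONDITION & SPEC =====
def Spec_orthogonalize_points (points : List (Int × Int)) (first_axis : String) (out : List (Int × Int)) : Prop := out = orthogonalize_points_alt points first_axis
instance (points : List (Int × Int)) (first_axis : String) (out : List (Int × Int)) : Decidable (Spec_orthogonalize_points points first_axis out) := by unfold Spec_orthogonalize_points; infer_instance

-- ===== CLAIM (what is proved, stated in full; the proofs are below) =====
def Claim_equal_orthogonalize_points : Prop := ∀ (points : List (Int × Int)) (first_axis : String), Dom_orthogonalize_points points first_axis → Spec_orthogonalize_points points first_axis (orthogonalize_points points first_axis)

-- ===== LEMMAS AND PROOFS =====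
-- Plan: removing the middle point of an axis-collinear consecutive triple is a rewrite Step.
-- A's fixpoint loop performs Steps and stops in a normal form (no collinear triple); B's stack
-- pass is invariant under Step (push_push: absorbing a collinear push) and is the identity on a
-- normal form — so both compute the same list.

-- Prop-level collinearity
def Collin (a b c : Int × Int) : Prop :=
  (a.1 = b.1 ∧ b.1 = c.1) ∨ (a.2 = b.2 ∧ b.2 = c.2)

theorem collin_iff {a b c : Int × Int} : pvCollin a b c = true ↔ Collin a b c := by
  simp [pvCollin, Collin]

-- one rewrite step: drop the middle of an axis-collinear consecutive triple
def Step (l l' : List (Int × Int)) : Prop :=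
  ∃ u a b c v, Collin a b c ∧ l = u ++ a :: b :: c :: v ∧ l' = u ++ a :: c :: v

-- normal form: no axis-collinear consecutive triple
def NF : List (Int × Int) → Prop
  | a :: b :: c :: t => ¬ Collin a b c ∧ NF (b :: c :: t)
  | _ => True

-- normal form of a reversed stack (head = top of stack)
def NFr : List (Int × Int) → Prop
  | p :: q :: r :: t => ¬ Collin r q p ∧ NFr (q :: r :: t)
  | _ => True

theorem NF_tail : ∀ {a : Int × Int} {l}, NF (a :: l) → NF l := by
  intro a l h
  match l with
  | [] => trivial
  | [x] => trivial
  | x :: y :: t => exact h.2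

theorem NF_append_right : ∀ (x z : List (Int × Int)), NF (x ++ z) → NF z := by
  intro x
  induction x with
  | nil => intro z h; simpa using h
  | cons a x ih => intro z h; exact ih z (NF_tail h)

theorem NFr_tail : ∀ {a : Int × Int} {l}, NFr (a :: l) → NFr l := by
  intro a l h
  match l with
  | [] => trivial
  | [x] => trivial
  | x :: y :: t => exact h.2

theorem pvPopWhile_shape (p : Int × Int) : ∀ (s : List (Int × Int)),
    ∃ t, pvPopWhile p s = p :: t := by
  intro s
  fun_induction pvPopWhile p s with
  | case1 q r t hcol ih => exact ih
  | case2 q r t hcol => exact ⟨_, rfl⟩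
  | case3 => exact ⟨_, rfl⟩

theorem pvPopWhile_NFr (p : Int × Int) : ∀ (s : List (Int × Int)), NFr s → NFr (pvPopWhile p s) := by
  intro s
  fun_induction pvPopWhile p s with
  | case1 q r t hcol ih => intro h; exact ih (NFr_tail h)
  | case2 q r t hcol => intro h; exact ⟨fun hc => hcol (collin_iff.mpr hc), h⟩
  | case3 s hs =>
    intro h
    match s with
    | [] => trivial
    | [q] => trivial
    | q :: r :: t => exact absurd rfl (hs q r t)

-- Lemma L: pushing b then c equals pushing c alone when top q, b, c share an axis
theorem push_absorb : ∀ (t : List (Int × Int)) (q b c : Int × Int), NFr (q :: t) → Collin q b c →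
    pvPush (pvPush (q :: t) b) c = pvPush (q :: t) c := by
  intro t
  induction t with
  | nil =>
    intro q b c _ hcol
    have hb := collin_iff.mpr hcol
    simp [pvPush, pvPopWhile, hb]
  | cons r t' ih =>
    intro q b c hnf hcol
    have hb := collin_iff.mpr hcol
    by_cases h1 : Collin r q b
    · have hb1 := collin_iff.mpr h1
      by_cases hqb : q = b
      · -- pushing b leaves the stack unchanged
        have hpushb : pvPush (q :: r :: t') b = q :: r :: t' := by
          subst hqb
          rw [pvPush, pvPopWhile, if_pos hb1]
          match t', hnf with
          | [], _ => rfl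
          | s :: t'', hnf =>
            rw [pvPopWhile, if_neg]
            intro hc
            exact hnf.1 (collin_iff.mp hc)
        rw [hpushb]
      · -- q ≠ b forces one shared axis among r, q, b, c
        rcases hcol with ⟨hx1, hx2⟩ | ⟨hy1, hy2⟩ <;>
          rcases h1 with ⟨ha1, ha2⟩ | ⟨ha3, ha4⟩
        · have hrbc : Collin r b c := Or.inl ⟨ha1.trans hx1, hx2⟩
          have hrqc : pvCollin r q c = true := collin_iff.mpr (Or.inl ⟨ha1, hx1.trans hx2⟩)
          have hkey := ih r b c (NFr_tail hnf) hrbc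
          have hinner : pvPush (q :: r :: t') b = pvPush (r :: t') b := by
            rw [pvPush, pvPopWhile, if_pos (collin_iff.mpr (Or.inl ⟨ha1, ha2⟩))]; rfl
          have hout : pvPush (q :: r :: t') c = pvPush (r :: t') c := by
            rw [pvPush, pvPopWhile, if_pos hrqc]; rfl
          rw [hinner, hkey, hout]
        · exact absurd (Prod.ext hx1 ha4) hqb
        · exact absurd (Prod.ext ha2 hy1) hqb
        · have hrbc : Collin r b c := Or.inr ⟨ha3.trans hy1, hy2⟩
          have hrqc : pvCollin r q c = true := collin_iff.mpr (Or.inr ⟨ha3, hy1.trans hy2⟩)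
          have hkey := ih r b c (NFr_tail hnf) hrbc
          have hinner : pvPush (q :: r :: t') b = pvPush (r :: t') b := by
            rw [pvPush, pvPopWhile, if_pos (collin_iff.mpr (Or.inr ⟨ha3, ha4⟩))]; rfl
          have hout : pvPush (q :: r :: t') c = pvPush (r :: t') c := by
            rw [pvPush, pvPopWhile, if_pos hrqc]; rfl
          rw [hinner, hkey, hout]
    · have hb1 : ¬ pvCollin r q b = true := fun hc => h1 (collin_iff.mp hc)
      have hinner : pvPush (q :: r :: t') b = b :: q :: r :: t' := by
        rw [pvPush, pvPopWhile, if_neg hb1]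
      rw [hinner, pvPush, pvPopWhile, if_pos hb]
      rfl

-- diamond-style lemma: on a stack with top a, pushing b then c equals pushing c alone
theorem push_push (a b c : Int × Int) (s : List (Int × Int)) (hnf : NFr (a :: s))
    (hcol : Collin a b c) : pvPush (pvPush (a :: s) b) c = pvPush (a :: s) c := by
  have hb := collin_iff.mpr hcol
  match s with
  | [] => simp [pvPush, pvPopWhile, hb]
  | q :: t =>
    by_cases h1 : Collin q a b
    · have hb1 := collin_iff.mpr h1
      by_cases hab : a = b
      · have hpushb : pvPush (a :: q :: t) b = a :: q :: t := by
          subst hab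
          rw [pvPush, pvPopWhile, if_pos hb1]
          match t, hnf with
          | [], _ => rfl
          | r :: t', hnf =>
            rw [pvPopWhile, if_neg]
            intro hc
            exact hnf.1 (collin_iff.mp hc)
        rw [hpushb]
      · rcases hcol with ⟨hx1, hx2⟩ | ⟨hy1, hy2⟩ <;>
          rcases h1 with ⟨ha1, ha2⟩ | ⟨ha3, ha4⟩
        · have hqbc : Collin q b c := Or.inl ⟨ha1.trans hx1, hx2⟩
          have hqac : pvCollin q a c = true := collin_iff.mpr (Or.inl ⟨ha1, hx1.trans hx2⟩)
          have hkey := push_absorb t q b c (NFr_tail hnf) hqbc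
          have hinner : pvPush (a :: q :: t) b = pvPush (q :: t) b := by
            rw [pvPush, pvPopWhile, if_pos (collin_iff.mpr (Or.inl ⟨ha1, ha2⟩))]; rfl
          have hout : pvPush (a :: q :: t) c = pvPush (q :: t) c := by
            rw [pvPush, pvPopWhile, if_pos hqac]; rfl
          rw [hinner, hkey, hout]
        · exact absurd (Prod.ext hx1 ha4) hab
        · exact absurd (Prod.ext ha2 hy1) hab
        · have hqbc : Collin q b c := Or.inr ⟨ha3.trans hy1, hy2⟩
          have hqac : pvCollin q a c = true := collin_iff.mpr (Or.inr ⟨ha3, hy1.trans hy2⟩)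
          have hkey := push_absorb t q b c (NFr_tail hnf) hqbc
          have hinner : pvPush (a :: q :: t) b = pvPush (q :: t) b := by
            rw [pvPush, pvPopWhile, if_pos (collin_iff.mpr (Or.inr ⟨ha3, ha4⟩))]; rfl
          have hout : pvPush (a :: q :: t) c = pvPush (q :: t) c := by
            rw [pvPush, pvPopWhile, if_pos hqac]; rfl
          rw [hinner, hkey, hout]
    · have hb1 : ¬ pvCollin q a b = true := fun hc => h1 (collin_iff.mp hc)
      have hinner : pvPush (a :: q :: t) b = b :: a :: q :: t := by
        rw [pvPush, pvPopWhile, if_neg hb1]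
      rw [hinner, pvPush, pvPopWhile, if_pos hb]
      rfl

theorem foldl_push_NFr : ∀ (l : List (Int × Int)) s, NFr s → NFr (List.foldl pvPush s l) := by
  intro l
  induction l with
  | nil => intro s hs; simpa using hs
  | cons p l ih => intro s hs; exact ih _ (pvPopWhile_NFr p s hs)

-- a rewrite step does not change the result of the stack pass
theorem step_foldl {l l' : List (Int × Int)} (h : Step l l') :
    List.foldl pvPush [] l = List.foldl pvPush [] l' := by
  obtain ⟨u, a, b, c, v, hcol, rfl, rfl⟩ := h
  rw [List.foldl_append, List.foldl_append]
  simp only [List.foldl_cons]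
  have hS : NFr (List.foldl pvPush [] u) := foldl_push_NFr u [] trivial
  obtain ⟨t, ht⟩ := pvPopWhile_shape a (List.foldl pvPush [] u)
  have hSa : NFr (pvPush (List.foldl pvPush [] u) a) := pvPopWhile_NFr a _ hS
  have hkey : pvPush (pvPush (pvPush (List.foldl pvPush [] u) a) b) c
      = pvPush (pvPush (List.foldl pvPush [] u) a) c := by
    have h1 : pvPush (List.foldl pvPush [] u) a = a :: t := ht
    rw [h1] at hSa ⊢
    exact push_push a b c t hSa hcol
  rw [hkey]

theorem steps_foldl {l l' : List (Int × Int)} (h : Relation.ReflTransGen Step l l') :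
    List.foldl pvPush [] l = List.foldl pvPush [] l' := by
  induction h with
  | refl => rfl
  | tail _ hstep ih => exact ih.trans (step_foldl hstep)

-- the stack pass is the identity (up to reversal) on a normal form
theorem foldl_push_of_NF : ∀ (m s : List (Int × Int)), NF (s.reverse ++ m) →
    List.foldl pvPush s m = m.reverse ++ s := by
  intro m
  induction m with
  | nil => intro s _; simp
  | cons p m' ih =>
    intro s hnf
    have hpush : pvPush s p = p :: s := by
      match s with
      | [] => rfl
      | [q] => rfl
      | q :: r :: t =>
        rw [pvPush, pvPopWhile, if_neg]
        intro hc
        have hc' := collin_iff.mp hc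
        have hnf' : NF ((r :: q :: p :: m' : List (Int × Int))) := by
          have := NF_append_right t.reverse (r :: q :: p :: m')
          apply this
          simpa using hnf
        exact hnf'.1 hc'
    rw [List.foldl_cons, hpush]
    have := ih (p :: s) (by simpa using hnf)
    rw [this]
    simp

-- A-side: a pass that reports a change never reports no change (ch is monotone)
theorem pvPassGo_false : ∀ (rest : List (Int × Int)) a accRev ch,
    (pvPassGo a accRev rest ch).2 = false → ch = false := by
  intro rest a accRev ch
  fun_induction pvPassGo a accRev rest ch with
  | case1 a accRev ch b c t hcol ih => intro h; exact absurd (ih h) (by simp)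
  | case2 a accRev ch b c t hcol ih => exact ih
  | case3 => exact fun h => h
  | case4 => exact fun h => h

-- A-side: each pass performs rewrite Steps
theorem passGo_steps : ∀ (rest : List (Int × Int)) (a : Int × Int) (accRev : List (Int × Int)) ch
    (acc' : List (Int × Int)), accRev = a :: acc' →
    Relation.ReflTransGen Step (accRev.reverse ++ rest) (pvPassGo a accRev rest ch).1 := by
  intro rest
  induction rest with
  | nil =>
    intro a accRev ch acc' hacc; rw [pvPassGo]; simp
    exact Relation.ReflTransGen.refl
  | cons b rest ih =>
    intro a accRev ch acc' hacc
    match rest with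
    | [] =>
      rw [pvPassGo]; simp
      exact Relation.ReflTransGen.refl
    | c :: t =>
      rw [pvPassGo.eq_def]
      simp only
      by_cases hcol : pvCollin a b c
      · rw [if_pos hcol]
        have hstep : Step (accRev.reverse ++ b :: c :: t) (accRev.reverse ++ c :: t) := by
          refine ⟨acc'.reverse, a, b, c, t, collin_iff.mp hcol, ?_, ?_⟩ <;>
            simp [hacc]
        exact Relation.ReflTransGen.head hstep (ih a accRev true acc' hacc)
      · rw [if_neg hcol]
        have := ih b (b :: accRev) ch accRev rfl
        simpa using this

-- A-side: a pass reporting no change returns its input, which is a normal form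
theorem passGo_nochange : ∀ (rest : List (Int × Int)) (a : Int × Int) accRev,
    (pvPassGo a accRev rest false).2 = false →
    (pvPassGo a accRev rest false).1 = accRev.reverse ++ rest ∧ NF (a :: rest) := by
  intro rest
  induction rest with
  | nil =>
    intro a accRev h; rw [pvPassGo]
    exact ⟨by simp, trivial⟩
  | cons b rest ih =>
    intro a accRev h
    match rest with
    | [] =>
      rw [pvPassGo]
      exact ⟨by simp, trivial⟩
    | c :: t =>
      rw [pvPassGo.eq_def] at h ⊢
      simp only at h ⊢
      by_cases hcol : pvCollin a b c
      · rw [if_pos hcol] at h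
        exact absurd (pvPassGo_false (c :: t) a accRev true h) (by simp)
      · rw [if_neg hcol] at h ⊢
        obtain ⟨h1, h2⟩ := ih b (b :: accRev) h
        refine ⟨by simpa using h1, ?_, h2⟩
        exact fun hc => hcol (collin_iff.mpr hc)

theorem NF_short {l : List (Int × Int)} (h : l.length ≤ 2) : NF l := by
  match l with
  | [] => trivial
  | [a] => trivial
  | [a, b] => trivial
  | a :: b :: c :: t => simp at h

theorem pvLoopA_spec : ∀ (s : List (Int × Int)),
    Relation.ReflTransGen Step s (pvLoopA s) ∧ NF (pvLoopA s) := by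
  intro s
  fun_induction pvLoopA s with
  | case1 => exact ⟨Relation.ReflTransGen.refl, trivial⟩
  | case2 a rest hlen hch ih =>
    obtain ⟨ih1, ih2⟩ := ih
    have hsteps := passGo_steps rest a [a] false [] rfl
    simp only [List.reverse_cons, List.reverse_nil, List.nil_append, List.singleton_append] at hsteps
    exact ⟨hsteps.trans ih1, ih2⟩
  | case3 a rest hlen hch =>
    simp only [Bool.not_eq_true] at hch
    obtain ⟨h1, h2⟩ := passGo_nochange rest a [a] hch
    simp only [List.reverse_cons, List.reverse_nil, List.nil_append, List.singleton_append] at h1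
    rw [h1]
    exact ⟨Relation.ReflTransGen.refl, h2⟩
  | case4 a rest hlen =>
    refine ⟨Relation.ReflTransGen.refl, NF_short ?_⟩
    simp at hlen ⊢
    omega

-- both simplifications of the same (deduped) list agree
theorem simplify_core (d : List (Int × Int)) : (List.foldl pvPush [] d).reverse = pvLoopA d := by
  obtain ⟨hsteps, hnf⟩ := pvLoopA_spec d
  have h1 : List.foldl pvPush [] d = List.foldl pvPush [] (pvLoopA d) := steps_foldl hsteps
  have h2 : List.foldl pvPush [] (pvLoopA d) = (pvLoopA d).reverse := by
    have := foldl_push_of_NF (pvLoopA d) [] (by simpa using hnf)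
    simpa using this
  rw [h1, h2, List.reverse_reverse]

-- ===== VERDICT (by name: the statement is the Claim_ definition above) =====
theorem orthogonalize_points_spec : Claim_equal_orthogonalize_points := by
  intro points first_axis _
  unfold Spec_orthogonalize_points orthogonalize_points orthogonalize_points_alt
  match points with
  | [] => rfl
  | p :: rest =>
    simp only
    congr 1
    unfold pvSimplifyA pvSimplifyB
    match pvBuildGo first_axis [p] rest with
    | [] => rfl
    | q :: qs => exact (simplify_core (q :: pvDedupGo q qs)).symm
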